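-- pv_equiv track=rewrite | github.com/Asundersole32/Grafos | Heuristica_gulosa/Heuristica_conjuntos.py | single_maximum_set
-- ===== SOURCE A (Python) =====
-- def single_maximum_set(graph):
--     vertices = list(graph.keys())
--     independent_sets = []
--     for i in vertices:
--         clique = []
--         clique.append(i)
--         for v in vertices:
--             if v in clique:
--                 continue
--             is_next = True
--             for u in clique:
--                 if u in graph[v]:
--                     continue
--                 else:
--                     is_next = False
--                     break
--             if is_next:
--                 clique.append(v)
--         if clique not in independent_sets:
--             independent_sets.append(clique)
--
--     return independent_sets
-- ===== SOURCE B (Python) =====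
-- def single_maximum_set(graph):
--     vertices = list(graph.keys())
--     independent_sets = []
--     for i in vertices:
--         allowed = [x for x in vertices if x != i and i in graph[x]]
--         clique = [i]
--         while allowed:
--             v = allowed[0]
--             clique.append(v)
--             allowed = [x for x in allowed[1:] if v in graph[x]]
--         if clique not in independent_sets:
--             independent_sets.append(clique)
--     return independent_sets
-- ===== Notes on version B (the rewrite author's own statement) =====
-- stated objective: faster
-- what changed: Per start vertex, B maintains a shrinking 'allowed' candidate worklist (filtered once by adjacency to each newly added clique member) instead of A's re-testing every vertex against the whole clique plus a clique-membership re-scan per candidate.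
import Mathlib
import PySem

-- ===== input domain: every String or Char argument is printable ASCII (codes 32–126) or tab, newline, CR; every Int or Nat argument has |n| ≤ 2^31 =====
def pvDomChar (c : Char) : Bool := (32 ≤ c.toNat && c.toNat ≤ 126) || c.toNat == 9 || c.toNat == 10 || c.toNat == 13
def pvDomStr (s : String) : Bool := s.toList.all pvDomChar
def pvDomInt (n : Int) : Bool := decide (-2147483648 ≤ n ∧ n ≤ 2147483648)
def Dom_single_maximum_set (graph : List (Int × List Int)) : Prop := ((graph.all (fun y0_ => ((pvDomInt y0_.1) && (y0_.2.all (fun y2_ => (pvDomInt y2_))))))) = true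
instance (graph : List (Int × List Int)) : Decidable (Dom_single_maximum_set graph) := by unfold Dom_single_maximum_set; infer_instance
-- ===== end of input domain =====

-- B replaces A's per-candidate re-scan of the whole clique by a shrinking 'allowed' candidate
-- worklist maintained per start vertex (alternative decomposition, same return value).

-- ===== PORT A =====
def single_maximum_set (graph : List (Int × List Int)) : List (List Int) :=
  let d := PySem.Dict.ofList graph
  let vertices := d.keys
  vertices.foldl (fun independent_sets i =>
    let clique :=
      vertices.foldl (fun clique v =>
        if clique.contains v then clique
        else
          let is_next := clique.all (fun u => (d.getD v []).contains u)
          if is_next then clique ++ [v] else clique) [i]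
    if independent_sets.contains clique then independent_sets
    else independent_sets ++ [clique]) []

-- ===== PORT B =====
-- the 'while allowed' loop of Source B: take the first allowed vertex, filter the rest by adjacency to it
def smsWalk (d : PySem.Dict Int (List Int)) : List Int → List Int
  | [] => []
  | v :: rest => v :: smsWalk d (rest.filter (fun x => (d.getD x []).contains v))
termination_by l => l.length
decreasing_by
  simp only [List.length_cons, Nat.lt_succ_iff, List.length_unattach]
  exact le_trans (List.length_filter_le _ _) (by simp)

def single_maximum_set_alt (graph : List (Int × List Int)) : List (List Int) :=
  let d := PySem.Dict.ofList graph
  let vertices := d.keys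
  vertices.foldl (fun independent_sets i =>
    let clique := i :: smsWalk d (vertices.filter (fun x => x != i && (d.getD x []).contains i))
    if independent_sets.contains clique then independent_sets
    else independent_sets ++ [clique]) []

-- ===== PRECONDITION & SPEC =====
def Spec_single_maximum_set (graph : List (Int × List Int)) (out : List (List Int)) : Prop := out = single_maximum_set_alt graph
instance (graph : List (Int × List Int)) (out : List (List Int)) : Decidable (Spec_single_maximum_set graph out) := by unfold Spec_single_maximum_set; infer_instance

-- ===== CLAIM (what is proved, stated in full; the proofs are below) =====
def Claim_equal_single_maximum_set : Prop := ∀ (graph : List (Int × List Int)), Dom_single_maximum_set graph → Spec_single_maximum_set graph (single_maximum_set graph)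

-- ===== LEMMAS AND PROOFS =====

-- equation lemmas for the worklist walk
lemma smsWalk_nil (d : PySem.Dict Int (List Int)) : smsWalk d [] = [] := by
  rw [smsWalk]

lemma smsWalk_cons (d : PySem.Dict Int (List Int)) (v : Int) (rest : List Int) :
    smsWalk d (v :: rest) = v :: smsWalk d (rest.filter (fun x => (d.getD x []).contains v)) := by
  rw [smsWalk]

-- A's inner loop over the remaining vertices vs, with current clique c, equals c followed by
-- B's worklist walk over the vertices of vs that pass the full clique test against c.
lemma sms_loop_eq (d : PySem.Dict Int (List Int)) :
    ∀ (vs : List Int) (c : List Int), vs.Nodup →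
      vs.foldl (fun clique v =>
          if clique.contains v then clique
          else if clique.all (fun u => (d.getD v []).contains u) then clique ++ [v] else clique) c
      = c ++ smsWalk d (vs.filter (fun x =>
          !(c.contains x) && c.all (fun u => (d.getD x []).contains u))) := by
  intro vs
  induction vs with
  | nil => intro c _; simp [smsWalk_nil]
  | cons v rest ih =>
    intro c hnd
    have hndr : rest.Nodup := hnd.of_cons
    have hvn : v ∉ rest := (List.nodup_cons.mp hnd).1
    by_cases hc : c.contains v = true
    · -- v already in the clique: skipped by A, filtered out by B
      rw [List.foldl_cons, if_pos hc, List.filter_cons,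
        if_neg (by rw [hc]; simp), ih c hndr]
    · by_cases hall : (c.all fun u => (d.getD v []).contains u) = true
      · -- v is appended to the clique
        rw [List.foldl_cons, if_neg hc, if_pos hall, ih (c ++ [v]) hndr,
          List.filter_cons, if_pos (by rw [Bool.eq_false_iff.mpr hc, hall]; rfl),
          smsWalk_cons, List.filter_filter]
        have hfil : List.filter (fun x => !(c ++ [v]).contains x &&
              (c ++ [v]).all fun u => (d.getD x []).contains u) rest
            = List.filter (fun a => (d.getD a []).contains v &&
              (!c.contains a && c.all fun u => (d.getD a []).contains u)) rest := by
          apply List.filter_congr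
          intro x hx
          have hxv : x ≠ v := fun h => hvn (h ▸ hx)
          have h1 : (c ++ [v]).contains x = c.contains x := by simp [hxv]
          have h2 : ((c ++ [v]).all fun u => (d.getD x []).contains u)
              = (c.all (fun u => (d.getD x []).contains u) && (d.getD x []).contains v) := by
            simp
          rw [h1, h2]
          cases c.contains x <;> cases (d.getD x []).contains v <;>
            cases c.all (fun u => (d.getD x []).contains u) <;> rfl
        rw [hfil]
        simp
      · -- v fails the clique test: not appended, filtered out
        rw [List.foldl_cons, if_neg hc, if_neg hall, List.filter_cons,
          if_neg (by rw [Bool.eq_false_iff.mpr hall]; simp), ih c hndr]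

theorem single_maximum_set_spec : Claim_equal_single_maximum_set := by
  unfold Claim_equal_single_maximum_set Spec_single_maximum_set
  intro graph _
  unfold single_maximum_set single_maximum_set_alt
  have hnd : (PySem.Dict.ofList graph).keys.Nodup := PySem.Dict.nodup_keys_ofList graph
  dsimp only
  congr 1
  funext independent_sets i
  rw [sms_loop_eq (PySem.Dict.ofList graph) _ [i] hnd, List.singleton_append]
  have hf : (fun x : Int => !(([i] : List Int).contains x) &&
      ([i] : List Int).all (fun u => ((PySem.Dict.ofList graph).getD x []).contains u))
      = (fun x : Int => (x != i) && ((PySem.Dict.ofList graph).getD x []).contains i) := by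
    funext x
    simp [bne, BEq.comm, eq_comm, Bool.beq_eq_decide_eq]
  rw [hf]
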